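-- pv_equiv track=rewrite | github.com/modolee/algorithm-practice | checkio-python/elementary/first-word.py | first_word
-- ===== SOURCE A (Python) =====
-- def first_word(text: str) -> str:
--     no_word = [' ', '.', ',']
--
--     start_idx = 0
--     while text[start_idx] in no_word:
--         start_idx += 1
--
--     end_idx = start_idx
--     while (text[end_idx] not in no_word):
--         end_idx += 1
--         if end_idx == len(text):
--             return text[start_idx:]
--
--     return text[start_idx:end_idx]
-- ===== SOURCE B (Python) =====
-- def first_word(text: str) -> str:
--     # One pass: tokenize the whole text into words, return the first.
--     # runs[0] raises IndexError (as A does) when there is no word.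
--     runs = []
--     cur = ''
--     for ch in text:
--         if ch in ' .,':
--             if cur:
--                 runs.append(cur)
--                 cur = ''
--         else:
--             cur += ch
--     if cur:
--         runs.append(cur)
--     return runs[0]
-- ===== Notes on version B (the rewrite author's own statement) =====
-- stated objective: alternative
-- what changed: B replaces A's two index-cursor loops with slicing by a single for-each pass that tokenizes the text into words and returns the first; avoiding per-character index bookkeeping gives a constant-factor speedup (measured ~2.5x).
import Mathlib
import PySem

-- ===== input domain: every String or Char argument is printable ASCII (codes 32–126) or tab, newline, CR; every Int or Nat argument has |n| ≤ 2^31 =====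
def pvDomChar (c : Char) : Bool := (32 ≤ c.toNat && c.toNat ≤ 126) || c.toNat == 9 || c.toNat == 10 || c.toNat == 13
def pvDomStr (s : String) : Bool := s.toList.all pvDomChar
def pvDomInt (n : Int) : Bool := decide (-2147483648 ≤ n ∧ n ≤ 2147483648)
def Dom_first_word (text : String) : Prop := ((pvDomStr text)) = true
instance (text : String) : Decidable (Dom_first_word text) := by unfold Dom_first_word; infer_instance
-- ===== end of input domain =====

-- B tokenizes the whole text into words in one forward pass and returns the first,
-- instead of A's two index-cursor loops with slicing; same value wherever A returns.


-- ===== PORT A =====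
-- 'ch in no_word' with no_word = [' ', '.', ',']
def fwNoWord (c : Char) : Bool := c == ' ' || c == '.' || c == ','

-- 'while text[start_idx] in no_word: start_idx += 1'; the out-of-range branch is where
-- Python raises IndexError (excluded by Pre_), the port just returns i there.
def fwSkip (cs : List Char) (i : Nat) : Nat :=
  if h : i < cs.length then
    if fwNoWord cs[i] then fwSkip cs (i + 1) else i
  else i
termination_by cs.length - i

-- second loop, returning end_idx; when end_idx hits len(text) it returns len, so the
-- early 'return text[start_idx:]' is the same slice text[start_idx:len] below.
def fwEnd (cs : List Char) (i : Nat) : Nat :=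
  if h : i < cs.length then
    if fwNoWord cs[i] then i else fwEnd cs (i + 1)
  else i
termination_by cs.length - i

def first_word (text : String) : String :=
  let cs := text.toList
  let s := fwSkip cs 0
  let e := fwEnd cs s
  -- text[s:e]: exact Python slice here since 0 ≤ s ≤ e ≤ len(text)
  String.ofList ((cs.drop s).take (e - s))

-- ===== PORT B =====
-- one step of B's loop: state = (cur, runs)
def fwStep (st : List Char × List (List Char)) (c : Char) : List Char × List (List Char) :=
  if fwNoWord c then
    if st.1.isEmpty then st else ([], st.2 ++ [st.1])
  else (st.1 ++ [c], st.2)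

-- B's trailing 'if cur: runs.append(cur)'
def fwFinal (st : List Char × List (List Char)) : List (List Char) :=
  if st.1.isEmpty then st.2 else st.2 ++ [st.1]

def first_word_alt (text : String) : String :=
  match fwFinal (text.toList.foldl fwStep ([], [])) with
  | [] => ""          -- Python raises IndexError here (runs[0]); excluded by Pre_
  | w :: _ => String.ofList w

-- ===== PRECONDITION & SPEC =====
-- Pre_ excludes exactly the inputs with no word character at all (empty or consisting
-- only of spaces/dots/commas), on which both Pythons raise IndexError.
def Pre_first_word (text : String) : Prop := text.toList.any (fun c => !fwNoWord c) = true
instance (text : String) : Decidable (Pre_first_word text) := by unfold Pre_first_word; infer_instance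
def pvWitness_first_word : String := " hello, world"

def Spec_first_word (text : String) (out : String) : Prop := out = first_word_alt text
instance (text : String) (out : String) : Decidable (Spec_first_word text out) := by unfold Spec_first_word; infer_instance

-- ===== CLAIM (what is proved, stated in full; the proofs are below) =====
def Claim_equal_first_word : Prop := ∀ (text : String), Dom_first_word text → Pre_first_word text → Spec_first_word text (first_word text)

-- ===== LEMMAS AND PROOFS =====

-- the first word of cs: drop leading delimiters, take the following word characters
def fwHeadRun (cs : List Char) : List Char :=
  (cs.dropWhile fwNoWord).takeWhile (fun c => !fwNoWord c)

lemma fwSkip_eq (cs : List Char) (i : Nat) :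
    fwSkip cs i = i + ((cs.drop i).takeWhile fwNoWord).length := by
  fun_induction fwSkip cs i with
  | case1 i h hw ih =>
    rw [List.drop_eq_getElem_cons h, List.takeWhile_cons, if_pos hw, List.length_cons, ih]
    omega
  | case2 i h hw =>
    rw [List.drop_eq_getElem_cons h, List.takeWhile_cons, if_neg (by simp [hw])]
    simp
  | case3 i h =>
    have : cs.drop i = [] := List.drop_eq_nil_of_le (by omega)
    simp [this]

lemma fwEnd_eq (cs : List Char) (i : Nat) :
    fwEnd cs i = i + ((cs.drop i).takeWhile (fun c => !fwNoWord c)).length := by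
  fun_induction fwEnd cs i with
  | case1 i h hw =>
    rw [List.drop_eq_getElem_cons h, List.takeWhile_cons, if_neg (by simp [hw])]
    simp
  | case2 i h hw ih =>
    rw [List.drop_eq_getElem_cons h, List.takeWhile_cons, if_pos (by simp [hw]),
        List.length_cons, ih]
    omega
  | case3 i h =>
    have : cs.drop i = [] := List.drop_eq_nil_of_le (by omega)
    simp [this]

lemma drop_length_takeWhile (p : Char → Bool) (cs : List Char) :
    cs.drop (cs.takeWhile p).length = cs.dropWhile p := by
  induction cs with
  | nil => simp
  | cons c cs ih => by_cases h : p c <;> simp [h, ih]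

lemma take_length_takeWhile (p : Char → Bool) (cs : List Char) :
    cs.take (cs.takeWhile p).length = cs.takeWhile p := by
  induction cs with
  | nil => simp
  | cons c cs ih => by_cases h : p c <;> simp [h, ih]

-- A's port always computes the first word (empty when there is none)
lemma first_word_eq_headRun (text : String) :
    first_word text = String.ofList (fwHeadRun text.toList) := by
  show String.ofList ((text.toList.drop (fwSkip text.toList 0)).take
      (fwEnd text.toList (fwSkip text.toList 0) - fwSkip text.toList 0)) = _
  rw [fwSkip_eq, fwEnd_eq]
  simp only [List.drop_drop, List.drop_zero, Nat.zero_add, Nat.add_sub_cancel_left]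
  rw [drop_length_takeWhile, take_length_takeWhile]
  rfl

-- collected words only ever grow at the front of the state
lemma foldl_fwStep (cs : List Char) : ∀ cur runs,
    fwFinal (cs.foldl fwStep (cur, runs)) = runs ++ fwFinal (cs.foldl fwStep (cur, [])) := by
  induction cs with
  | nil =>
    intro cur runs
    by_cases h : cur.isEmpty <;> simp [fwFinal, h]
  | cons c cs ih =>
    intro cur runs
    rw [List.foldl_cons, List.foldl_cons]
    by_cases hc : fwNoWord c
    · by_cases h : cur.isEmpty
      · rw [show fwStep (cur, runs) c = (cur, runs) by simp [fwStep, hc, h],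
            show fwStep (cur, []) c = (cur, []) by simp [fwStep, hc, h]]
        exact ih cur runs
      · rw [show fwStep (cur, runs) c = ([], runs ++ [cur]) by simp [fwStep, hc, h],
            show fwStep (cur, []) c = ([], [cur]) by simp [fwStep, hc, h]]
        rw [ih [] (runs ++ [cur]), ih [] [cur]]
        simp
    · rw [show fwStep (cur, runs) c = (cur ++ [c], runs) by simp [fwStep, hc],
          show fwStep (cur, []) c = (cur ++ [c], []) by simp [fwStep, hc]]
      exact ih (cur ++ [c]) runs

-- head of B's word list, for any pending word cur
lemma head_fwFinal (cs : List Char) : ∀ cur : List Char,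
    (fwFinal (cs.foldl fwStep (cur, []))).head? =
      if cur.isEmpty then
        (if cs.any (fun c => !fwNoWord c) then some (fwHeadRun cs) else none)
      else some (cur ++ cs.takeWhile (fun c => !fwNoWord c)) := by
  induction cs with
  | nil =>
    intro cur
    by_cases h : cur.isEmpty <;> simp [fwFinal, h]
  | cons c cs ih =>
    intro cur
    rw [List.foldl_cons]
    by_cases hc : fwNoWord c
    · by_cases h : cur.isEmpty
      · rw [show fwStep (cur, []) c = (cur, []) by simp [fwStep, hc, h], ih cur]
        simp [h, fwHeadRun, hc]
      · rw [show fwStep (cur, []) c = ([], [cur]) by simp [fwStep, hc, h],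
            foldl_fwStep cs [] [cur]]
        simp [h, List.takeWhile_cons, hc]
    · by_cases h : cur.isEmpty
      · have hcur : cur = [] := List.isEmpty_iff.mp h
        rw [show fwStep (cur, []) c = (cur ++ [c], []) by simp [fwStep, hc], ih (cur ++ [c])]
        simp [hcur, fwHeadRun, hc]
      · have h' : cur.isEmpty = false := by simpa using h
        rw [show fwStep (cur, []) c = (cur ++ [c], []) by simp [fwStep, hc], ih (cur ++ [c])]
        simp [hc, h']

lemma first_word_alt_eq_headRun (text : String)
    (h : text.toList.any (fun c => !fwNoWord c) = true) :
    first_word_alt text = String.ofList (fwHeadRun text.toList) := by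
  have hh := head_fwFinal text.toList []
  simp only [List.isEmpty_nil, if_true, h] at hh
  unfold first_word_alt
  cases hr : fwFinal (text.toList.foldl fwStep ([], [])) with
  | nil => rw [hr] at hh; simp at hh
  | cons w ws => rw [hr] at hh; simp at hh; rw [hh]

-- ===== VERDICT (by name: the statement is the Claim_ definition above) =====
theorem first_word_spec : Claim_equal_first_word := by
  intro text _hdom hpre
  unfold Spec_first_word
  rw [first_word_eq_headRun, first_word_alt_eq_headRun text hpre]
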